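-- pv_equiv track=rewrite | github.com/alexzaccaron/prefsuf | get_prefix_suffix.py | get_suffix_prefix
-- ===== SOURCE A (Python) =====
-- def get_suffix_prefix(seq1, seq2, minlen):
--
-- 	for i in range(100):                 # at most this bases are chopped from 5' and 3' ends of seq1 and seq2, respectively
-- 		seq1sub = seq1[:len(seq1)-i]     # get seq1 and seq2 chopped bases at their 5' and 3' ends
-- 		seq2sub = seq2[i:]
--
--
-- 		# check if they overlap, with identical suffix and prefix
-- 		for char in range(len(seq1sub)):
-- 			if seq2sub.startswith(seq1sub[char:]) and len(seq1sub[char:]) >= minlen: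
--
-- 				# if they overlap, return the merged sequence
-- 				return(str(i) + '.' + str(len(seq1sub[char:])))
--
-- 	return('0') # if they don't overlap, return character 0
-- ===== SOURCE B (Python) =====
-- def get_suffix_prefix(seq1, seq2, minlen):
--     # One left-to-right pass per offset maintaining the set of all live
--     # suffix-of-seq1sub = prefix-of-seq2sub match lengths (descending list),
--     # instead of re-running startswith for every start position.
--     for i in range(100):
--         seq1sub = seq1[:len(seq1)-i]
--         seq2sub = seq2[i:]
--         m = []  # descending list of k>0: last k chars seen == seq2sub[:k]
--         for c in seq1sub:
--             m = [k + 1 for k in m + [0] if k < len(seq2sub) and seq2sub[k] == c]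
--         if m and m[0] >= minlen:
--             return str(i) + '.' + str(m[0])
--     return '0'
-- ===== Notes on version B (the rewrite author's own statement) =====
-- stated objective: alternative
-- what changed: Per offset, instead of re-testing every start position with a fresh O(n) startswith comparison, B makes one left-to-right pass over seq1sub maintaining the descending list of all live match lengths (suffix of scanned prefix = prefix of seq2sub) and reads off the maximum at the end.
import Mathlib
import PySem

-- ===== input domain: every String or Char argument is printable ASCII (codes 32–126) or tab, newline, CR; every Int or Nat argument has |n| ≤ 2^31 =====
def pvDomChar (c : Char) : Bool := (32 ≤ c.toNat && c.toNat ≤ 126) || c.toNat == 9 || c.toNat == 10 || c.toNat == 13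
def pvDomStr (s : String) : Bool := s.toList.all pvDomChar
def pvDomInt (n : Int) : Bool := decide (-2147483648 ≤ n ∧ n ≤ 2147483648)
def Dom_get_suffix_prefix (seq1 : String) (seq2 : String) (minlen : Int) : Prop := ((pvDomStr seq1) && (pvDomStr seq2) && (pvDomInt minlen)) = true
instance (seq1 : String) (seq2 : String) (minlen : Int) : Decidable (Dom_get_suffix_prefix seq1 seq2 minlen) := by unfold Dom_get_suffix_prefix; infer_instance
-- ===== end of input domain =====

-- B replaces A's per-start-position startswith scans by one left-to-right pass per offset
-- that maintains the descending list of all live suffix=prefix match lengths (alternative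
-- decomposition; same worst-case cost).

-- ===== PORT A =====
-- inner 'for char in range(len(seq1sub))' loop with its early return
def pvA_inner (i : Int) (s1sub s2sub : List Char) (minlen : Int) : List Int → Option String
  | [] => none
  | ch :: rest =>
      let suf := PySem.List.slice s1sub (some ch) none
      if PySem.Chars.startswith s2sub suf && decide (minlen ≤ (suf.length : Int)) then
        some (PySem.Int.toStr i ++ "." ++ PySem.Int.toStr (suf.length : Int))
      else pvA_inner i s1sub s2sub minlen rest

-- outer 'for i in range(100)' loop
def pvA_outer (seq1 seq2 : List Char) (minlen : Int) : List Int → String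
  | [] => "0"
  | i :: rest =>
      let s1sub := PySem.List.slice seq1 none (some ((seq1.length : Int) - i))
      let s2sub := PySem.List.slice seq2 (some i) none
      match pvA_inner i s1sub s2sub minlen (PySem.List.pyRange 0 (s1sub.length : Int) 1) with
      | some s => s
      | none => pvA_outer seq1 seq2 minlen rest

def get_suffix_prefix (seq1 : String) (seq2 : String) (minlen : Int) : String :=
  pvA_outer seq1.toList seq2.toList minlen (PySem.List.pyRange 0 100 1)

-- ===== PORT B =====
-- 'm = [k + 1 for k in m + [0] if k < len(seq2sub) and seq2sub[k] == c]'
def pvB_step (s2sub : List Char) (m : List Int) (c : Char) : List Int :=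
  ((m ++ [0]).filter
      (fun k => decide (k < (s2sub.length : Int)) && (PySem.List.pyGet? s2sub k == some c))).map
    (· + 1)

def pvB_outer (seq1 seq2 : List Char) (minlen : Int) : List Int → String
  | [] => "0"
  | i :: rest =>
      let s1sub := PySem.List.slice seq1 none (some ((seq1.length : Int) - i))
      let s2sub := PySem.List.slice seq2 (some i) none
      match s1sub.foldl (pvB_step s2sub) [] with
      | [] => pvB_outer seq1 seq2 minlen rest
      | k :: _ =>
          if decide (minlen ≤ k) then PySem.Int.toStr i ++ "." ++ PySem.Int.toStr k
          else pvB_outer seq1 seq2 minlen rest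

def get_suffix_prefix_alt (seq1 : String) (seq2 : String) (minlen : Int) : String :=
  pvB_outer seq1.toList seq2.toList minlen (PySem.List.pyRange 0 100 1)

-- ===== PRECONDITION & SPEC =====
def Spec_get_suffix_prefix (seq1 : String) (seq2 : String) (minlen : Int) (out : String) : Prop := out = get_suffix_prefix_alt seq1 seq2 minlen
instance (seq1 : String) (seq2 : String) (minlen : Int) (out : String) : Decidable (Spec_get_suffix_prefix seq1 seq2 minlen out) := by unfold Spec_get_suffix_prefix; infer_instance

-- ===== CLAIM (what is proved, stated in full; the proofs are below) =====
def Claim_equal_get_suffix_prefix : Prop := ∀ (seq1 : String) (seq2 : String) (minlen : Int), Dom_get_suffix_prefix seq1 seq2 minlen → Spec_get_suffix_prefix seq1 seq2 minlen (get_suffix_prefix seq1 seq2 minlen)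

-- ===== LEMMAS AND PROOFS =====

-- [n, n-1, ..., 1]
def descKs (n : Nat) : List Nat := (List.range n).map (fun c => n - c)

-- k is a match length: the length-k suffix of a equals the length-k prefix of b
def goodK (a b : List Char) (k : Nat) : Bool :=
  decide (k ≤ b.length) && decide (b.take k = a.drop (a.length - k))

-- all match lengths, descending, as Ints
def mspec (a b : List Char) : List Int :=
  ((descKs a.length).filter (goodK a b)).map (Nat.cast : Nat → Int)

-- what one offset contributes
def resOf (i minlen : Int) : List Nat → Option String
  | [] => none
  | k :: _ =>
      if minlen ≤ (k : Int) then
        some (PySem.Int.toStr i ++ "." ++ PySem.Int.toStr (k : Int))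
      else none

lemma good_zero (a b : List Char) : goodK a b 0 = true := by
  simp [goodK]

lemma good_ext (a b : List Char) (c : Char) (k : Nat) (hk : k ≤ a.length) :
    goodK (a ++ [c]) b (k + 1)
      = (goodK a b k && (decide (k < b.length) && (b[k]? == some c))) := by
  have hdrop : (a ++ [c]).drop ((a ++ [c]).length - (k + 1)) = a.drop (a.length - k) ++ [c] := by
    rw [List.length_append]
    have h1 : a.length + [c].length - (k + 1) = a.length - k := by
      simp only [List.length_cons, List.length_nil]
      omega
    rw [h1, List.drop_append_of_le_length (by omega)]
  rw [Bool.eq_iff_iff]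
  simp only [goodK, hdrop, Bool.and_eq_true, decide_eq_true_eq, beq_iff_eq]
  constructor
  · rintro ⟨hle, heq⟩
    have hklt : k < b.length := by omega
    have hget := List.getElem?_eq_getElem hklt
    rw [List.take_add_one, hget] at heq
    have hlen1 : (b.take k).length = (a.drop (a.length - k)).length := by
      simp only [List.length_take, List.length_drop]
      omega
    obtain ⟨h1, h2⟩ := List.append_inj heq hlen1
    refine ⟨⟨by omega, h1⟩, hklt, ?_⟩
    rw [hget]
    simpa using h2
  · rintro ⟨⟨hle, heq⟩, hklt, hgc⟩
    refine ⟨by omega, ?_⟩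
    rw [List.take_add_one, hgc]
    simp [heq]

lemma startswith_eq_good (a b : List Char) (k : Nat) (hk : k ≤ a.length) :
    PySem.Chars.startswith b (a.drop (a.length - k)) = goodK a b k := by
  have hlen : (a.drop (a.length - k)).length = k := by simp; omega
  rw [Bool.eq_iff_iff, PySem.Chars.startswith_iff]
  simp only [goodK, Bool.and_eq_true, decide_eq_true_eq]
  constructor
  · intro h
    have hle := h.length_le
    rw [hlen] at hle
    refine ⟨hle, ?_⟩
    rw [List.prefix_iff_eq_take] at h
    rw [hlen] at h
    exact h.symm
  · rintro ⟨hle, heq⟩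
    rw [List.prefix_iff_eq_take, hlen]
    exact heq.symm

lemma descKs_append_zero (n : Nat) :
    descKs n ++ [0] = (List.range (n + 1)).map (fun c => n - c) := by
  rw [List.range_succ]
  simp [descKs]

lemma pvB_step_mspec (a b : List Char) (c : Char) :
    pvB_step b (mspec a b) c = mspec (a ++ [c]) b := by
  have hzero : mspec a b ++ [(0 : Int)]
      = ((descKs a.length ++ [0]).filter (goodK a b)).map (Nat.cast : Nat → Int) := by
    simp [mspec, List.filter_append, good_zero]
  rw [pvB_step, hzero, List.filter_map, List.filter_filter, List.map_map]
  have hdesc : descKs (a ++ [c]).length = (descKs a.length ++ [0]).map (fun k => k + 1) := by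
    rw [descKs_append_zero]
    simp only [descKs, List.length_append, List.length_cons, List.length_nil, List.map_map]
    refine List.map_congr_left ?_
    intro x hx
    simp only [List.mem_range] at hx
    simp only [Function.comp]
    omega
  rw [mspec, hdesc, List.filter_map, List.map_map]
  refine congrArg₂ _ ?_ (List.filter_congr ?_).symm
  · funext k
    simp only [Function.comp]
    push_cast
    ring
  · intro k hk
    rw [descKs_append_zero] at hk
    simp only [List.mem_map, List.mem_range] at hk
    obtain ⟨c', hc', rfl⟩ := hk
    have hk' : a.length - c' ≤ a.length := by omega
    simp only [Function.comp]
    rw [good_ext a b c _ hk', PySem.List.pyGet?_natCast]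
    simp only [Nat.cast_lt]
    rw [Bool.and_comm]

lemma foldl_eq_mspec (a b : List Char) : a.foldl (pvB_step b) [] = mspec a b := by
  induction a using List.reverseRecOn with
  | nil => simp [mspec, descKs]
  | append_singleton a c ih =>
      rw [List.foldl_append, List.foldl_cons, List.foldl_nil, ih, pvB_step_mspec]

lemma pvA_inner_eq (i minlen : Int) (a b : List Char) (ks : List Nat)
    (hp : ks.Pairwise (· > ·)) (hb : ∀ k ∈ ks, 1 ≤ k ∧ k ≤ a.length) :
    pvA_inner i a b minlen (ks.map (fun k => ((a.length - k : Nat) : Int)))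
      = resOf i minlen (ks.filter (goodK a b)) := by
  induction ks with
  | nil => simp [pvA_inner, resOf]
  | cons k ks ih =>
      obtain ⟨hk1, hk2⟩ := hb k (by simp)
      have hlen : (PySem.List.slice a (some ((a.length - k : Nat) : Int)) none).length = k := by
        rw [PySem.List.slice_from_natCast]
        simp only [List.length_drop]
        omega
      have hsw : PySem.Chars.startswith b
          (PySem.List.slice a (some ((a.length - k : Nat) : Int)) none) = goodK a b k := by
        rw [PySem.List.slice_from_natCast]
        exact startswith_eq_good a b k hk2
      have hrest : pvA_inner i a b minlen (ks.map (fun k => ((a.length - k : Nat) : Int)))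
          = resOf i minlen (ks.filter (goodK a b)) :=
        ih hp.of_cons (fun k' hk' => hb k' (by simp [hk']))
      rw [List.map_cons]
      show (if PySem.Chars.startswith b _ && decide (minlen ≤ _) then _ else _)
          = resOf i minlen ((k :: ks).filter (goodK a b))
      rw [hsw, hlen, List.filter_cons]
      by_cases hg : goodK a b k = true
      · rw [hg]
        simp only [Bool.true_and]
        by_cases hm : minlen ≤ (k : Int)
        · rw [if_pos (by simpa using hm)]
          simp [resOf, hm]
        · rw [if_neg (by simpa using hm), hrest]
          simp only [resOf, if_true]
          rw [if_neg hm]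
          have hall : ∀ x ∈ ks.filter (goodK a b), (x : Int) < (k : Int) := by
            intro x hx
            have hxk : x ∈ ks := List.mem_of_mem_filter hx
            have := (List.pairwise_cons.mp hp).1 x hxk
            exact_mod_cast this
          cases hks : ks.filter (goodK a b) with
          | nil => simp
          | cons k2 t =>
              have hk2' : (k2 : Int) < (k : Int) := hall k2 (by rw [hks]; simp)
              have hnm : ¬ minlen ≤ (k2 : Int) := by omega
              simp [hnm]
      · simp only [Bool.not_eq_true] at hg
        rw [hg]
        simp only [Bool.false_and, Bool.false_eq_true, if_false]
        exact hrest

lemma pyRange_eq_descKs_map (a : List Char) :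
    PySem.List.pyRange 0 (a.length : Int) 1
      = (descKs a.length).map (fun k => ((a.length - k : Nat) : Int)) := by
  rw [PySem.List.pyRange_zero_natCast]
  simp only [descKs, List.map_map]
  refine List.map_congr_left ?_
  intro c hc
  simp only [List.mem_range] at hc
  simp only [Function.comp]
  congr 1
  omega

lemma descKs_pairwise (n : Nat) : (descKs n).Pairwise (· > ·) := by
  rw [List.pairwise_iff_getElem]
  intro i j hi hj hij
  simp only [descKs, List.length_map, List.length_range] at hi hj
  simp only [descKs, List.getElem_map, List.getElem_range]
  omega

lemma descKs_mem (n : Nat) : ∀ k ∈ descKs n, 1 ≤ k ∧ k ≤ n := by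
  intro k hk
  simp only [descKs, List.mem_map, List.mem_range] at hk
  obtain ⟨c, hc, rfl⟩ := hk
  omega

lemma outer_eq (seq1 seq2 : List Char) (minlen : Int) (l : List Int) :
    pvA_outer seq1 seq2 minlen l = pvB_outer seq1 seq2 minlen l := by
  induction l with
  | nil => rfl
  | cons i rest ih =>
      rw [pvA_outer, pvB_outer]
      set a := PySem.List.slice seq1 none (some ((seq1.length : Int) - i)) with ha
      set b := PySem.List.slice seq2 (some i) none with hb2
      rw [pyRange_eq_descKs_map a,
        pvA_inner_eq i minlen a b (descKs a.length) (descKs_pairwise _) (descKs_mem _),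
        foldl_eq_mspec a b, mspec]
      cases hf : (descKs a.length).filter (goodK a b) with
      | nil => simpa [resOf] using ih
      | cons k t =>
          simp only [List.map_cons, resOf]
          by_cases hm : minlen ≤ (k : Int)
          · simp [hm]
          · simp [hm, ih]

-- ===== VERDICT (by name: the statement is the Claim_ definition above) =====
theorem get_suffix_prefix_spec : Claim_equal_get_suffix_prefix := by
  intro seq1 seq2 minlen _
  unfold Spec_get_suffix_prefix get_suffix_prefix get_suffix_prefix_alt
  exact outer_eq _ _ _ _
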